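-- pv_equiv track=rewrite | github.com/KRUMER2023/DsaQueSoln | chococut.py | max_chocolate_kept
-- ===== SOURCE A (Python) =====
-- def max_chocolate_kept(n, m, k):
--     total = n * m
--     max_keep = 0
--
--     if k == 0:
--         return total
--
--     for i in range(1, n):
--         part1 = i * m
--         part2 = (n - i) * m
--         if part1 >= k:
--             max_keep = max(max_keep, part2)
--         if part2 >= k:
--             max_keep = max(max_keep, part1)
--
--     for j in range(1, m):
--         part1 = n * j
--         part2 = n * (m - j)
--         if part1 >= k:
--             max_keep = max(max_keep, part2)
--         if part2 >= k:
--             max_keep = max(max_keep, part1)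
--
--     return max_keep
-- ===== SOURCE B (Python) =====
-- def max_chocolate_kept(n, m, k):
--     # O(1): the kept piece (rows - i) * cols is monotone in the cut index i, so
--     # the optimum over the feasible cuts lies at an endpoint; check the O(1)
--     # candidate endpoints instead of scanning every cut.
--     if k == 0:
--         return n * m
--     return max(_best(n, m, k), _best(m, n, k))
--
--
-- def _best(rows, cols, k):
--     # Best piece kept after cutting off i rows (area i * cols >= k to give away).
--     # The feasible i form an interval inside [1, rows - 1] whose data-dependent
--     # endpoint sits next to k // cols, so only these candidates can be optimal.
--     cand = [1, rows - 1]
--     if cols != 0: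
--         q = k // cols
--         cand += [q, q + 1]
--     best = 0
--     for i in cand:
--         if 1 <= i <= rows - 1 and i * cols >= k:
--             best = max(best, (rows - i) * cols)
--     return best
-- ===== Notes on version B (the rewrite author's own statement) =====
-- stated objective: faster
-- what changed: Replaces the two linear scans over all cut positions by an O(1) check: the kept area is monotone in the cut index, so per direction only the endpoint candidates {1, rows-1, k//cols, k//cols+1} of the feasible cut interval can be optimal, each re-validated against the original constraint.
import Mathlib
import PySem

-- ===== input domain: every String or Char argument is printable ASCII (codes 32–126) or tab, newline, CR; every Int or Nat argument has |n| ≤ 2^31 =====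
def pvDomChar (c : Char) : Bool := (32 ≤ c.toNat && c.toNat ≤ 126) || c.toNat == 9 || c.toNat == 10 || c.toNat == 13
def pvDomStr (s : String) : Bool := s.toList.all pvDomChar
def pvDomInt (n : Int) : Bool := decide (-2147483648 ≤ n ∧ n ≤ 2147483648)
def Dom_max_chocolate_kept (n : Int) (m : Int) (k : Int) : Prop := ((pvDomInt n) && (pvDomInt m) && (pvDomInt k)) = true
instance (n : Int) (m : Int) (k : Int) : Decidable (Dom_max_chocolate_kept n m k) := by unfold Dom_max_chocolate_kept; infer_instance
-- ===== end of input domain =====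

-- B replaces A's two linear scans over all cut positions by an O(1) check of the endpoint candidates of the feasible cut interval.

-- ===== PORT A =====
def max_chocolate_kept (n : Int) (m : Int) (k : Int) : Int :=
  let total := n * m
  let max_keep : Int := 0
  if k = 0 then total
  else
    let max_keep := (PySem.List.pyRange 1 n).foldl (fun acc i =>
      let part1 := i * m
      let part2 := (n - i) * m
      let acc := if part1 ≥ k then max acc part2 else acc
      if part2 ≥ k then max acc part1 else acc) max_keep
    let max_keep := (PySem.List.pyRange 1 m).foldl (fun acc j =>
      let part1 := n * j
      let part2 := n * (m - j)
      let acc := if part1 ≥ k then max acc part2 else acc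
      if part2 ≥ k then max acc part1 else acc) max_keep
    max_keep

-- ===== PORT B =====
-- best piece kept after cutting off i rows (give-away area i*cols ≥ k); only the
-- endpoint candidates {1, rows-1, k//cols, k//cols+1} of the feasible interval can be optimal
def pvBestB (rows : Int) (cols : Int) (k : Int) : Int :=
  let cand : List Int := [1, rows - 1]
  let cand := if cols ≠ 0 then
      cand ++ [PySem.Int.floordiv k cols, PySem.Int.floordiv k cols + 1]
    else cand
  cand.foldl (fun best i =>
    if 1 ≤ i ∧ i ≤ rows - 1 ∧ i * cols ≥ k then max best ((rows - i) * cols) else best) 0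

def max_chocolate_kept_alt (n : Int) (m : Int) (k : Int) : Int :=
  if k = 0 then n * m
  else max (pvBestB n m k) (pvBestB m n k)

-- ===== PRECONDITION & SPEC =====
def Spec_max_chocolate_kept (n : Int) (m : Int) (k : Int) (out : Int) : Prop := out = max_chocolate_kept_alt n m k
instance (n : Int) (m : Int) (k : Int) (out : Int) : Decidable (Spec_max_chocolate_kept n m k out) := by unfold Spec_max_chocolate_kept; infer_instance

-- ===== CLAIM (what is proved, stated in full; the proofs are below) =====
def Claim_equal_max_chocolate_kept : Prop := ∀ (n : Int) (m : Int) (k : Int), Dom_max_chocolate_kept n m k → Spec_max_chocolate_kept n m k (max_chocolate_kept n m k)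

-- ===== LEMMAS AND PROOFS =====

-- the contribution of one iteration of A's loop, as an optional candidate value
def pvE (n : Int) (m : Int) (k : Int) (i : Int) : Option Int :=
  if i * m ≥ k then
    (if (n - i) * m ≥ k then some (max ((n - i) * m) (i * m)) else some ((n - i) * m))
  else
    (if (n - i) * m ≥ k then some (i * m) else none)

-- the contribution of one candidate of B's scan, as an optional value
def pvG (n : Int) (m : Int) (k : Int) (i : Int) : Option Int :=
  if 1 ≤ i ∧ i ≤ n - 1 ∧ i * m ≥ k then some ((n - i) * m) else none

-- B's candidate list, named for the proofs
def pvCandL (n : Int) (m : Int) (k : Int) : List Int :=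
  if m ≠ 0 then [1, n - 1, PySem.Int.floordiv k m, PySem.Int.floordiv k m + 1]
  else [1, n - 1]

def pvM (o : Option Int) (acc : Int) : Int :=
  match o with
  | none => acc
  | some v => max acc v

def pvOmax (o : Option Int) (o' : Option Int) : Option Int :=
  match o, o' with
  | none, o' => o'
  | some a, none => some a
  | some a, some b => some (max a b)

theorem pvM_pvOmax (o : Option Int) (o' : Option Int) (acc : Int) :
    pvM o' (pvM o acc) = pvM (pvOmax o o') acc := by
  cases o <;> cases o' <;> simp [pvM, pvOmax, max_assoc]

theorem pv_foldl_pvM (e : Int → Option Int) (L : List Int) :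
    ∀ (o : Option Int) (acc : Int),
      L.foldl (fun acc i => pvM (e i) acc) (pvM o acc)
        = pvM (L.foldl (fun o i => pvOmax o (e i)) o) acc := by
  induction L with
  | nil => intro o acc; rfl
  | cons a L ih =>
    intro o acc
    simp only [List.foldl_cons, pvM_pvOmax o (e a) acc]
    exact ih (pvOmax o (e a)) acc

theorem pv_foldl_none (e : Int → Option Int) (L : List Int) :
    ∀ (o : Option Int), (∀ i ∈ L, e i = none) →
      L.foldl (fun o i => pvOmax o (e i)) o = o := by
  induction L with
  | nil => intro o _; rfl
  | cons a L ih =>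
    intro o h
    simp only [List.foldl_cons]
    rw [h a (by simp)]
    have ho : pvOmax o none = o := by cases o <;> rfl
    rw [ho]
    exact ih o (fun i hi => h i (by simp [hi]))

theorem pv_foldl_some (e : Int → Option Int) (L : List Int) :
    ∀ (o : Option Int) (w : Int),
      (∀ i ∈ L, ∀ v, e i = some v → v ≤ w) →
      ((∃ i ∈ L, e i = some w) ∨ o = some w) →
      (∀ v, o = some v → v ≤ w) →
      L.foldl (fun o i => pvOmax o (e i)) o = some w := by
  induction L with
  | nil =>
    intro o w _ hex _
    rcases hex with ⟨i, hi, _⟩ | ho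
    · simp at hi
    · simpa using ho
  | cons a L ih =>
    intro o w hb hex ho
    simp only [List.foldl_cons]
    apply ih
    · exact fun i hi v hv => hb i (by simp [hi]) v hv
    · rcases hex with ⟨i, hi, hiw⟩ | how
      · rcases List.mem_cons.mp hi with rfl | hiL
        · right
          cases h : o with
          | none => simp [pvOmax, hiw]
          | some v =>
            have hv := ho v h
            simp [pvOmax, hiw, sup_eq_right.mpr hv]
        · left; exact ⟨i, hiL, hiw⟩
      · right
        cases h : e a with
        | none => simp [pvOmax, how]
        | some v =>
          have hv := hb a (by simp) v h
          simp [pvOmax, how, sup_eq_left.mpr hv]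
    · intro v hv
      cases h : o with
      | none =>
        cases h' : e a with
        | none => simp [pvOmax, h, h'] at hv
        | some u => have := hb a (by simp) u h'; simp [pvOmax, h, h'] at hv; omega
      | some u =>
        have hu := ho u h
        cases h' : e a with
        | none => simp [pvOmax, h, h'] at hv; omega
        | some u' =>
          have := hb a (by simp) u' h'
          simp [pvOmax, h, h'] at hv
          omega

-- for m > 0 the give-away condition i*m ≥ k says i ≥ ceil(k/m)
theorem pv_cond_pos {m k : Int} (hm : 0 < m) (i : Int) :
    (i * m ≥ k) ↔ -(PySem.Int.floordiv (-k) m) ≤ i := by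
  have h := (PySem.Int.neg_floordiv_neg_eq_iff_of_pos (a := k)
    (q := -(PySem.Int.floordiv (-k) m)) hm).mp rfl
  constructor
  · intro hk
    by_contra hlt
    rw [not_le] at hlt
    have hle : i ≤ -(PySem.Int.floordiv (-k) m) - 1 := by omega
    have := mul_le_mul_of_nonneg_right hle hm.le
    nlinarith
  · intro hle
    have := mul_le_mul_of_nonneg_right hle hm.le
    omega

-- for m < 0 the give-away condition i*m ≥ k says i ≤ floor(k/m)
theorem pv_cond_neg {m k : Int} (hm : m < 0) (i : Int) :
    (i * m ≥ k) ↔ i ≤ PySem.Int.floordiv k m := by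
  have he : PySem.Int.floordiv k m = PySem.Int.floordiv (-k) (-m) := by
    rw [← PySem.Int.floordiv_neg_neg (-k) (-m)]; simp
  rw [he, PySem.Int.le_floordiv_iff_mul_le (a := -k) (b := -m) (q := i) (by omega)]
  constructor <;> intro <;> nlinarith

-- for m > 0 the ceiling -((-k)//m) is k//m or k//m + 1
theorem pv_ceil_cases {m k : Int} (hm : 0 < m) :
    -(PySem.Int.floordiv (-k) m) = PySem.Int.floordiv k m ∨
    -(PySem.Int.floordiv (-k) m) = PySem.Int.floordiv k m + 1 := by
  have hq := (PySem.Int.floordiv_eq_iff_of_pos (a := k) (b := m)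
    (q := PySem.Int.floordiv k m) hm).mp rfl
  have hc := (PySem.Int.neg_floordiv_neg_eq_iff_of_pos (a := k)
    (q := -(PySem.Int.floordiv (-k) m)) hm).mp rfl
  set q := PySem.Int.floordiv k m
  set c := -(PySem.Int.floordiv (-k) m)
  have h1 : q ≤ c := by
    by_contra h
    rw [not_le] at h
    have : (c + 1) * m ≤ q * m := mul_le_mul_of_nonneg_right (by omega) hm.le
    nlinarith [hq.1, hc.2]
  have h2 : c ≤ q + 1 := by
    by_contra h
    rw [not_le] at h
    have : (q + 1) * m ≤ (c - 1) * m := mul_le_mul_of_nonneg_right (by omega) hm.le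
    nlinarith [hq.2, hc.1]
  omega

-- when a feasible optimal cut istar exists, both optional scans return its kept piece
theorem pv_opt_feas (n m k istar : Int) (L : List Int)
    (h1 : 1 ≤ istar) (h2 : istar ≤ n - 1) (h3 : istar * m ≥ k)
    (hub : ∀ i : Int, 1 ≤ i → i ≤ n - 1 → i * m ≥ k → (n - i) * m ≤ (n - istar) * m)
    (hmem : istar ∈ L) :
    (PySem.List.pyRange 1 n).foldl (fun o i => pvOmax o (pvE n m k i)) none = some ((n - istar) * m)
    ∧ L.foldl (fun o i => pvOmax o (pvG n m k i)) none = some ((n - istar) * m) := by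
  have hflip : ∀ i : Int, 1 ≤ i → i ≤ n - 1 → (n - i) * m ≥ k → i * m ≤ (n - istar) * m := by
    intro i hi1 hi2 hge
    have h := hub (n - i) (by omega) (by omega) hge
    have he : n - (n - i) = i := by ring
    rwa [he] at h
  constructor
  · apply pv_foldl_some
    · intro i hiL v hv
      have hmem' := PySem.List.mem_pyRange_one.mp hiL
      simp only [pvE] at hv
      split_ifs at hv with ha hb hb <;> simp only [Option.some.injEq] at hv <;> subst hv
      · exact max_le (hub i (by omega) (by omega) ha) (hflip i (by omega) (by omega) hb)
      · exact hub i (by omega) (by omega) ha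
      · exact hflip i (by omega) (by omega) hb
    · refine Or.inl ⟨istar, PySem.List.mem_pyRange_one.mpr ⟨h1, by omega⟩, ?_⟩
      simp only [pvE]
      by_cases hb : (n - istar) * m ≥ k
      · have hle := hflip istar h1 h2 hb
        simp [h3, hb, max_eq_left hle]
      · simp [h3, hb]
    · intro v hv; cases hv
  · apply pv_foldl_some
    · intro i _ v hv
      simp only [pvG] at hv
      split_ifs at hv with hg
      cases hv
      exact hub i hg.1 hg.2.1 hg.2.2
    · exact Or.inl ⟨istar, hmem, by simp [pvG, h1, h2, h3]⟩
    · intro v hv; cases hv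

-- when no cut in this direction is feasible, both optional scans are empty
theorem pv_opt_infeas (n m k : Int) (L : List Int)
    (hinf : ∀ i : Int, 1 ≤ i → i ≤ n - 1 → ¬ (i * m ≥ k)) :
    (PySem.List.pyRange 1 n).foldl (fun o i => pvOmax o (pvE n m k i)) none = none
    ∧ L.foldl (fun o i => pvOmax o (pvG n m k i)) none = none := by
  constructor
  · apply pv_foldl_none
    intro i hiL
    have hmem := PySem.List.mem_pyRange_one.mp hiL
    have ha := hinf i (by omega) (by omega)
    have hb := hinf (n - i) (by omega) (by omega)
    simp [pvE, ha, hb]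
  · apply pv_foldl_none
    intro i _
    simp only [pvG]
    split_ifs with hg
    · exact absurd hg.2.2 (hinf i hg.1 hg.2.1)
    · rfl

-- A's scan over every cut and B's scan over the endpoint candidates find the same optimum
theorem pv_opt_eq (n m k : Int) :
    (PySem.List.pyRange 1 n).foldl (fun o i => pvOmax o (pvE n m k i)) none
      = (pvCandL n m k).foldl (fun o i => pvOmax o (pvG n m k i)) none := by
  rcases lt_trichotomy m 0 with hm | hm | hm
  · -- m < 0: feasible cuts are i ≤ k//m
    have hcond : ∀ i : Int, (i * m ≥ k) ↔ i ≤ PySem.Int.floordiv k m := fun i => pv_cond_neg hm i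
    set f := PySem.Int.floordiv k m with hf
    by_cases hfe : 1 ≤ f ∧ 2 ≤ n
    · obtain ⟨hf1, hn⟩ := hfe
      have hub : ∀ i : Int, 1 ≤ i → i ≤ n - 1 → i * m ≥ k → (n - i) * m ≤ (n - min (n - 1) f) * m := by
        intro i _ hi2 h3
        have := (hcond i).mp h3
        exact mul_le_mul_of_nonpos_right (by omega) hm.le
      have hmem : min (n - 1) f ∈ pvCandL n m k := by
        have h : min (n - 1) f = n - 1 ∨ min (n - 1) f = f := by omega
        simp only [pvCandL, if_pos (show m ≠ 0 by omega), ← hf]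
        rcases h with h | h <;> simp [h]
      obtain ⟨hL, hR⟩ := pv_opt_feas n m k (min (n - 1) f) _ (by omega) (by omega)
        ((hcond _).mpr (by omega)) hub hmem
      rw [hL, hR]
    · have hinf : ∀ i : Int, 1 ≤ i → i ≤ n - 1 → ¬ (i * m ≥ k) := by
        intro i h1 h2 h3
        have := (hcond i).mp h3
        omega
      obtain ⟨hL, hR⟩ := pv_opt_infeas n m k _ hinf
      rw [hL, hR]
  · -- m = 0: every piece has area 0
    subst hm
    by_cases hk : k ≤ 0 ∧ 2 ≤ n
    · obtain ⟨hk0, hn⟩ := hk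
      have hub : ∀ i : Int, 1 ≤ i → i ≤ n - 1 → i * 0 ≥ k → (n - i) * 0 ≤ (n - 1) * 0 := by
        intro i _ _ _; simp
      have hmem : (1 : Int) ∈ pvCandL n 0 k := by simp [pvCandL]
      have hfeas := pv_opt_feas n 0 k 1 (pvCandL n 0 k) le_rfl (by omega) (by simpa using hk0)
        (by simp) hmem
      rw [hfeas.1, hfeas.2]
    · have hinf : ∀ i : Int, 1 ≤ i → i ≤ n - 1 → ¬ (i * 0 ≥ k) := by
        intro i h1 h2 h3
        have : (0 : Int) ≥ k := by simpa using h3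
        omega
      obtain ⟨hL, hR⟩ := pv_opt_infeas n 0 k _ hinf
      rw [hL, hR]
  · -- m > 0: feasible cuts are i ≥ ceil(k/m)
    have hcond : ∀ i : Int, (i * m ≥ k) ↔ -(PySem.Int.floordiv (-k) m) ≤ i := fun i => pv_cond_pos hm i
    set c0 := -(PySem.Int.floordiv (-k) m) with hc0
    by_cases hfe : max 1 c0 ≤ n - 1
    · have hub : ∀ i : Int, 1 ≤ i → i ≤ n - 1 → i * m ≥ k → (n - i) * m ≤ (n - max 1 c0) * m := by
        intro i h1 _ h3
        have := (hcond i).mp h3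
        exact mul_le_mul_of_nonneg_right (by omega) hm.le
      have hmem : max 1 c0 ∈ pvCandL n m k := by
        have hcc := pv_ceil_cases (k := k) hm
        rw [← hc0] at hcc
        have h : max 1 c0 = 1 ∨ max 1 c0 = PySem.Int.floordiv k m ∨
            max 1 c0 = PySem.Int.floordiv k m + 1 := by omega
        simp only [pvCandL, if_pos (show m ≠ 0 by omega)]
        rcases h with h | h | h <;> simp [h]
      obtain ⟨hL, hR⟩ := pv_opt_feas n m k (max 1 c0) _ (by omega) (by omega)
        ((hcond _).mpr (by omega)) hub hmem
      rw [hL, hR]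
    · have hinf : ∀ i : Int, 1 ≤ i → i ≤ n - 1 → ¬ (i * m ≥ k) := by
        intro i h1 h2 h3
        have := (hcond i).mp h3
        omega
      obtain ⟨hL, hR⟩ := pv_opt_infeas n m k _ hinf
      rw [hL, hR]

-- B's candidate fold, written through the optional scan
theorem pvBestB_eq (n m k : Int) :
    pvBestB n m k = pvM ((pvCandL n m k).foldl (fun o i => pvOmax o (pvG n m k i)) none) 0 := by
  have hbody : (fun (best i : Int) =>
      if 1 ≤ i ∧ i ≤ n - 1 ∧ i * m ≥ k then max best ((n - i) * m) else best)
      = fun best i => pvM (pvG n m k i) best := by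
    funext best i
    simp only [pvG, pvM]
    split_ifs <;> rfl
  have h := pv_foldl_pvM (pvG n m k) (pvCandL n m k) none 0
  simp only [show pvM none 0 = (0 : Int) from rfl] at h
  rw [← h, ← hbody]
  by_cases hm : m ≠ 0 <;> simp only [pvBestB, pvCandL, hm, List.cons_append, List.nil_append]

theorem pvBestB_nonneg (n m k : Int) : 0 ≤ pvBestB n m k := by
  rw [pvBestB_eq]
  cases (pvCandL n m k).foldl (fun o i => pvOmax o (pvG n m k i)) none with
  | none => exact le_refl 0
  | some w => exact le_max_left 0 w

-- one direction of A's loop computes max acc (pvBestB n m k)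
theorem pv_dir (n m k acc : Int) (hacc : 0 ≤ acc) :
    (PySem.List.pyRange 1 n).foldl (fun acc i =>
      let part1 := i * m
      let part2 := (n - i) * m
      let acc := if part1 ≥ k then max acc part2 else acc
      if part2 ≥ k then max acc part1 else acc) acc
    = max acc (pvBestB n m k) := by
  have hbody : (fun (acc i : Int) =>
      let part1 := i * m
      let part2 := (n - i) * m
      let acc := if part1 ≥ k then max acc part2 else acc
      if part2 ≥ k then max acc part1 else acc)
      = fun acc i => pvM (pvE n m k i) acc := by
    funext acc i
    simp only [pvE, pvM]
    split_ifs <;> simp [max_assoc]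
  rw [hbody]
  have hfold := pv_foldl_pvM (pvE n m k) (PySem.List.pyRange 1 n) none acc
  simp only [show pvM none acc = acc from rfl] at hfold
  rw [hfold, pv_opt_eq, pvBestB_eq]
  cases (pvCandL n m k).foldl (fun o i => pvOmax o (pvG n m k i)) none with
  | none => simp [pvM, max_eq_left hacc]
  | some w => simp only [pvM]; omega

-- ===== VERDICT (by name: the statement is the Claim_ definition above) =====
theorem max_chocolate_kept_spec : Claim_equal_max_chocolate_kept := by
  intro n m k _
  unfold Spec_max_chocolate_kept max_chocolate_kept_alt max_chocolate_kept
  by_cases hk : k = 0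
  · simp [hk]
  · rw [if_neg hk, if_neg hk]
    have h2 : (fun (acc j : Int) =>
        let part1 := n * j
        let part2 := n * (m - j)
        let acc := if part1 ≥ k then max acc part2 else acc
        if part2 ≥ k then max acc part1 else acc)
        = fun (acc j : Int) =>
        let part1 := j * n
        let part2 := (m - j) * n
        let acc := if part1 ≥ k then max acc part2 else acc
        if part2 ≥ k then max acc part1 else acc := by
      funext acc j
      simp only [mul_comm n j, mul_comm n (m - j)]
    show (PySem.List.pyRange 1 m).foldl _ ((PySem.List.pyRange 1 n).foldl _ 0) = _
    rw [pv_dir n m k 0 le_rfl, h2, pv_dir m n k _ (le_max_left 0 _),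
      max_eq_right (pvBestB_nonneg n m k)]
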